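-- pv_equiv track=rewrite | github.com/iagostorch/FIA_BokuPlayer | utils.py | parse_board_resp
-- ===== SOURCE A (Python) =====
-- def parse_board_resp(bad_board):
-- 	board = []
-- 	for column in range(11):
-- 		if column <= 5:
-- 			height = 5 + column
-- 		else:
-- 			height = 15 - column
-- 		board.append([0] * height)
--
-- 	pieces_list = []
--
-- 	for ele in bad_board:
-- 		if(ele >= 48 and ele <= 50):
-- 			pieces_list.append((chr(ele)))
--
-- 	board[0] = pieces_list[0:5]
-- 	board[1] = pieces_list[5:11]
-- 	board[2] = pieces_list[11:18]
-- 	board[3] = pieces_list[18:26]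
-- 	board[4] = pieces_list[26:35]
-- 	board[5] = pieces_list[35:45]
-- 	board[6] = pieces_list[45:54]
-- 	board[7] = pieces_list[54:62]
-- 	board[8] = pieces_list[62:69]
-- 	board[9] = pieces_list[69:75]
-- 	board[10] = pieces_list[75:80]
--
-- 	return board
-- ===== SOURCE B (Python) =====
-- def parse_board_resp(bad_board):
--     bounds = [5, 11, 18, 26, 35, 45, 54, 62, 69, 75, 80]
--     board = [[] for _ in range(11)]
--     idx = 0
--     col = 0
--     for b in bad_board:
--         if 48 <= b <= 50:
--             if idx >= 80:
--                 break
--             while idx >= bounds[col]: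
--                 col += 1
--             board[col].append(chr(b))
--             idx += 1
--     return board
-- ===== Notes on version B (the rewrite author's own statement) =====
-- stated objective: alternative
-- what changed: B never materialises the flat filtered piece list nor slices it: it makes one pass over the raw bytes, maintaining a running piece count and a current-column pointer against cumulative column boundaries, distributing each accepted byte straight into its column bucket (with a break once 80 pieces are placed).
import Mathlib
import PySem

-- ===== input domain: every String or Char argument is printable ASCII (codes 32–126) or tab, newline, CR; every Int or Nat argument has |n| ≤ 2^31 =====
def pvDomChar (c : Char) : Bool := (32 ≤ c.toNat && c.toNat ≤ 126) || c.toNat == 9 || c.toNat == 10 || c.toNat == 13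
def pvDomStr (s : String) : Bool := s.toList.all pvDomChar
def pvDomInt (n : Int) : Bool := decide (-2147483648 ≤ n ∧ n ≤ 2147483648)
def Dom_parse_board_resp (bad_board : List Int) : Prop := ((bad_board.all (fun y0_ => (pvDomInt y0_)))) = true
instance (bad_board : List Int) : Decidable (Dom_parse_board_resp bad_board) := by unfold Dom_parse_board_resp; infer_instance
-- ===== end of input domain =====

-- B replaces A's filter-then-slice staging by a single pass that distributes each accepted
-- byte straight into its column bucket via cumulative boundaries (objective: alternative).

-- ===== PORT A =====
-- chr(n); exact for the only calls made (48 ≤ n ≤ 50, valid code points)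
def pvChr (n : Int) : String := String.ofList [Char.ofNat n.toNat]

def parse_board_resp (bad_board : List Int) : List (List String) :=
  -- initial board rows are [0]*height (lists of the int 0); every row is overwritten below,
  -- so they are represented by "0" placeholders of the same length
  let board : List (List String) :=
    (PySem.List.pyRange 0 11 1).foldl (fun acc column =>
      let height : Int := if column ≤ 5 then 5 + column else 15 - column
      acc ++ [List.replicate height.toNat "0"]) []
  let pieces_list : List String :=
    bad_board.foldl (fun acc ele => if ele ≥ 48 && ele ≤ 50 then acc ++ [pvChr ele] else acc) []
  let board := board.set 0 (PySem.List.slice pieces_list (some 0) (some 5))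
  let board := board.set 1 (PySem.List.slice pieces_list (some 5) (some 11))
  let board := board.set 2 (PySem.List.slice pieces_list (some 11) (some 18))
  let board := board.set 3 (PySem.List.slice pieces_list (some 18) (some 26))
  let board := board.set 4 (PySem.List.slice pieces_list (some 26) (some 35))
  let board := board.set 5 (PySem.List.slice pieces_list (some 35) (some 45))
  let board := board.set 6 (PySem.List.slice pieces_list (some 45) (some 54))
  let board := board.set 7 (PySem.List.slice pieces_list (some 54) (some 62))
  let board := board.set 8 (PySem.List.slice pieces_list (some 62) (some 69))
  let board := board.set 9 (PySem.List.slice pieces_list (some 69) (some 75))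
  let board := board.set 10 (PySem.List.slice pieces_list (some 75) (some 80))
  board

-- ===== PORT B =====
-- B's cumulative column boundaries: bounds = [5, 11, 18, 26, 35, 45, 54, 62, 69, 75, 80]
def pvBounds : List Nat := [5, 11, 18, 26, 35, 45, 54, 62, 69, 75, 80]

-- 'while idx >= bounds[col]: col += 1'; the fuel 11 bounds the while loop, which is never
-- exhausted because idx < 80 = bounds[10] whenever B runs it
def pvAdvance : Nat → Nat → Nat → Nat
  | 0, _, col => col
  | fuel + 1, idx, col => if pvBounds.getD col 1000 ≤ idx then pvAdvance fuel idx (col + 1) else col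

-- board[col].append(x) on the list-of-rows board
def pvAppendAt : List (List String) → Nat → String → List (List String)
  | [], _, _ => []
  | r :: rs, 0, x => (r ++ [x]) :: rs
  | r :: rs, n + 1, x => r :: pvAppendAt rs n x

-- the for-loop over bad_board with state (board, idx, col); 'break' returns the board as is
def pvGoB : List Int → List (List String) → Nat → Nat → List (List String)
  | [], board, _, _ => board
  | b :: rest, board, idx, col =>
    if 48 ≤ b && b ≤ 50 then
      if 80 ≤ idx then board
      else
        let col' := pvAdvance 11 idx col
        pvGoB rest (pvAppendAt board col' (pvChr b)) (idx + 1) col'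
    else pvGoB rest board idx col

def parse_board_resp_alt (bad_board : List Int) : List (List String) :=
  pvGoB bad_board (List.replicate 11 []) 0 0

-- ===== PRECONDITION & SPEC =====
def Spec_parse_board_resp (bad_board : List Int) (out : List (List String)) : Prop := out = parse_board_resp_alt bad_board
instance (bad_board : List Int) (out : List (List String)) : Decidable (Spec_parse_board_resp bad_board out) := by unfold Spec_parse_board_resp; infer_instance

-- ===== CLAIM (what is proved, stated in full; the proofs are below) =====
def Claim_equal_parse_board_resp : Prop := ∀ (bad_board : List Int), Dom_parse_board_resp bad_board → Spec_parse_board_resp bad_board (parse_board_resp bad_board)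

-- ===== LEMMAS AND PROOFS =====
-- the filtered piece list both versions are implicitly about
def pvPieces (l : List Int) : List String :=
  (l.filter (fun b => 48 ≤ b && b ≤ 50)).map pvChr

-- A's append-accumulating filter loop builds exactly the filtered piece list
theorem pieces_eq (l : List Int) (acc : List String) :
    l.foldl (fun acc ele => if ele ≥ 48 && ele ≤ 50 then acc ++ [pvChr ele] else acc) acc
      = acc ++ pvPieces l := by
  induction l generalizing acc with
  | nil => simp [pvPieces]
  | cons x xs ih =>
    rw [List.foldl_cons, ih]
    unfold pvPieces
    rw [List.filter_cons]
    by_cases h : (48 ≤ x ∧ x ≤ 50)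
    · simp [h]
    · simp [h]

-- B's loop depends on the raw bytes only through the filtered piece stream
def pvPlace : List String → List (List String) → Nat → Nat → List (List String)
  | [], board, _, _ => board
  | x :: rest, board, idx, col =>
    if 80 ≤ idx then board
    else pvPlace rest (pvAppendAt board (pvAdvance 11 idx col) x) (idx + 1) (pvAdvance 11 idx col)

theorem goB_eq_place (l : List Int) (board : List (List String)) (idx col : Nat) :
    pvGoB l board idx col = pvPlace (pvPieces l) board idx col := by
  induction l generalizing board idx col with
  | nil => simp [pvGoB, pvPieces, pvPlace]
  | cons b rest ih =>
    unfold pvGoB pvPieces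
    rw [List.filter_cons]
    by_cases h : (48 ≤ b ∧ b ≤ 50)
    · simp only [h, decide_true, Bool.and_self, if_true, List.map_cons]
      by_cases hi : 80 ≤ idx
      · simp [hi, pvPlace]
      · simp [hi, pvPlace, ih, pvPieces]
    · have : (decide (48 ≤ b) && decide (b ≤ 50)) = false := by
        rcases not_and_or.mp h with h' | h' <;> simp [h']
      simp [this, ih, pvPieces]

-- column offsets and heights
def pvOff : List Nat := [0, 5, 11, 18, 26, 35, 45, 54, 62, 69, 75]
def pvHgt : List Nat := [5, 6, 7, 8, 9, 10, 9, 8, 7, 6, 5]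

-- the slice board as a function of the piece list
def pvMkB (q : List String) : List (List String) :=
  [(q.drop 0).take 5, (q.drop 5).take 6, (q.drop 11).take 7, (q.drop 18).take 8, (q.drop 26).take 9,
   (q.drop 35).take 10, (q.drop 45).take 9, (q.drop 54).take 8, (q.drop 62).take 7,
   (q.drop 69).take 6, (q.drop 75).take 5]

theorem row_ne {α : Type} (q : List α) (x : α) (o h : Nat)
    (hq : o + h ≤ q.length ∨ q.length < o) :
    (q.drop o).take h = ((q ++ [x]).drop o).take h := by
  rcases hq with hq | hq
  · rw [List.drop_append_of_le_length (by omega),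
      List.take_append_of_le_length (by simp; omega)]
  · rw [List.drop_eq_nil_of_le (by omega), List.drop_eq_nil_of_le (by simp; omega), List.take_nil]

theorem row_eqc {α : Type} (q : List α) (x : α) (o h : Nat)
    (h1 : o ≤ q.length) (h2 : q.length < o + h) :
    (q.drop o).take h ++ [x] = ((q ++ [x]).drop o).take h := by
  rw [List.drop_append_of_le_length (by omega),
    List.take_of_length_le (by simp; omega), List.take_of_length_le (by simp; omega)]

-- appending the next piece to its column extends the slice board by that piece
theorem appendAt_mkB (q : List String) (x : String) (c : Nat) (hc : c ≤ 10)
    (hlo : pvOff.getD c 0 ≤ q.length) (hhi : q.length < pvOff.getD c 0 + pvHgt.getD c 0) :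
    pvAppendAt (pvMkB q) c x = pvMkB (q ++ [x]) := by
  interval_cases c <;>
    (simp only [pvOff, pvHgt, List.getD, List.getElem?_cons_zero, List.getElem?_cons_succ,
        Option.getD_some] at hlo hhi
     simp only [pvMkB, pvAppendAt, List.cons.injEq, and_true]
     refine ⟨?_, ?_, ?_, ?_, ?_, ?_, ?_, ?_, ?_, ?_, ?_⟩ <;>
       first
         | (apply row_ne; omega)
         | (apply row_eqc <;> omega))

-- where the while loop lands: bounded facts checked by computation
theorem adv_from (idx c : Nat) (h1 : idx < 80) (h2 : c ≤ pvAdvance 11 idx 0) :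
    pvAdvance 11 idx c = pvAdvance 11 idx 0 := by
  revert h2; revert c; revert h1; revert idx
  decide

theorem adv_facts (idx : Nat) (h : idx < 80) :
    pvAdvance 11 idx 0 ≤ 10 ∧ pvOff.getD (pvAdvance 11 idx 0) 0 ≤ idx ∧
      idx < pvOff.getD (pvAdvance 11 idx 0) 0 + pvHgt.getD (pvAdvance 11 idx 0) 0 := by
  revert h; revert idx; decide

theorem adv_mono (idx : Nat) (h : idx < 79) :
    pvAdvance 11 idx 0 ≤ pvAdvance 11 (idx + 1) 0 := by
  revert h; revert idx; decide

-- the loop invariant: placing pieces into the slice board of the pieces placed so far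
theorem place_mkB (p : List String) : ∀ (q : List String) (col : Nat),
    q.length ≤ 80 → (q.length < 80 → col ≤ pvAdvance 11 q.length 0) →
    pvPlace p (pvMkB q) q.length col = pvMkB (q ++ p.take (80 - q.length)) := by
  induction p with
  | nil => intro q col _ _; simp [pvPlace]
  | cons x rest ih =>
    intro q col hle hcol
    by_cases hi : 80 ≤ q.length
    · have : q.length = 80 := by omega
      simp [pvPlace, this]
    · have hlt : q.length < 80 := by omega
      have hadv := adv_from q.length col hlt (hcol hlt)
      obtain ⟨h10, hlo, hhi⟩ := adv_facts q.length hlt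
      simp only [pvPlace, if_neg hi, hadv]
      rw [appendAt_mkB q x _ h10 hlo hhi]
      have hlen : (q ++ [x]).length = q.length + 1 := by simp
      have hIH := ih (q ++ [x]) (pvAdvance 11 q.length 0)
        (by rw [hlen]; omega) (by rw [hlen]; intro h; exact adv_mono q.length (by omega))
      rw [hlen] at hIH
      rw [hIH]
      have h80 : 80 - q.length = (80 - (q.length + 1)) + 1 := by omega
      rw [h80, List.take_succ_cons]
      simp

-- the slice board reads at most the first 80 pieces
theorem mkB_take (p : List String) : pvMkB (p.take 80) = pvMkB p := by
  simp [pvMkB, List.drop_take, List.take_take]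

-- ===== VERDICT (by name: the statement is the Claim_ definition above) =====
set_option maxHeartbeats 2000000 in
theorem parse_board_resp_spec : Claim_equal_parse_board_resp := by
  intro bb _
  unfold Spec_parse_board_resp parse_board_resp parse_board_resp_alt
  rw [goB_eq_place]
  have hb0 : (List.replicate 11 ([] : List String)) = pvMkB [] := by decide
  rw [hb0]
  have := place_mkB (pvPieces bb) [] 0 (by simp) (by intro _; simp [pvAdvance, pvBounds])
  simp only [List.length_nil] at this
  rw [this, List.nil_append, Nat.sub_zero, mkB_take]
  simp only [pieces_eq, List.nil_append]
  set p := pvPieces bb with hp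
  have e0 := PySem.List.slice_natCast p 0 5;   norm_num at e0
  have e1 := PySem.List.slice_natCast p 5 11;  norm_num at e1
  have e2 := PySem.List.slice_natCast p 11 18; norm_num at e2
  have e3 := PySem.List.slice_natCast p 18 26; norm_num at e3
  have e4 := PySem.List.slice_natCast p 26 35; norm_num at e4
  have e5 := PySem.List.slice_natCast p 35 45; norm_num at e5
  have e6 := PySem.List.slice_natCast p 45 54; norm_num at e6
  have e7 := PySem.List.slice_natCast p 54 62; norm_num at e7
  have e8 := PySem.List.slice_natCast p 62 69; norm_num at e8
  have e9 := PySem.List.slice_natCast p 69 75; norm_num at e9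
  have e10 := PySem.List.slice_natCast p 75 80; norm_num at e10
  simp [PySem.List.pyRange, List.range_succ, List.set, pvMkB,
    e0, e1, e2, e3, e4, e5, e6, e7, e8, e9, e10]
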